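-- pv_equiv track=rewrite | github.com/pypi-data/pypi-mirror-210 | packages/pyslit/pyslit-1.0.0.tar.gz/pyslit-1.0.0/pyslit/src/pyslit.py | isaplha
-- ===== SOURCE A (Python) =====
-- def isaplha(sequence,l=0,r=None):
--     if r == None:
--         r = len(sequence)
--     sequence = sequence[l:r]
--     for i in sequence:
--         if ((ord(i) >= 65) and (ord(i) <= 90)) or ((ord(i) >= 97) and (ord(i) <= 122)):
--             return True
--         else:
--             continue
--     return False
-- ===== SOURCE B (Python) =====
-- def isaplha(sequence, l=0, r=None):
--     if r is None:
--         r = len(sequence)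
--     s = sequence[l:r]
--     return s.lower() != s.upper()
-- ===== Notes on version B (the rewrite author's own statement) =====
-- stated objective: alternative
-- what changed: B replaces A's per-character early-exit ord-range scan by case-mapping: it builds the lowercased and uppercased copies of the slice and returns whether they differ (only ASCII letters change under case mapping).
import Mathlib
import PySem

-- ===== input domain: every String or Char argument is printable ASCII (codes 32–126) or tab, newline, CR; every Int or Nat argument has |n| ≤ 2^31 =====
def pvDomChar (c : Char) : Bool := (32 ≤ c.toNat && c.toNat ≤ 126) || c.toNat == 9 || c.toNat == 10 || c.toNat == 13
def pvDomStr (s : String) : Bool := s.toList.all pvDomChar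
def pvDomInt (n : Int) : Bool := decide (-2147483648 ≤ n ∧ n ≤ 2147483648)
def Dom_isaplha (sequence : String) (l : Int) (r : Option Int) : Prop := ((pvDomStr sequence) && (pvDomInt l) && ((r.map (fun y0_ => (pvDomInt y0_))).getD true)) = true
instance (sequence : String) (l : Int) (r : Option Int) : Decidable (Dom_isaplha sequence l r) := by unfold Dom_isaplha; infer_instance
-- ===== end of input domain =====

-- B replaces A's per-character early-exit ord-range scan by case mapping: it lowercases
-- and uppercases the slice and returns whether the two copies differ (alternative, same cost).

-- ===== PORT A =====
-- the 'for i in sequence: if … return True else continue' loop, step for step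
def isaplhaLoop : List Char → Bool
  | [] => false
  | i :: rest =>
      if ((65 ≤ i.toNat && i.toNat ≤ 90) || (97 ≤ i.toNat && i.toNat ≤ 122)) then true
      else isaplhaLoop rest

def isaplha (sequence : String) (l : Int) (r : Option Int) : Bool :=
  isaplhaLoop (PySem.List.slice sequence.toList (some l)
    (some (match r with | none => (sequence.toList.length : Int) | some v => v)))

-- ===== PORT B =====
def isaplha_alt (sequence : String) (l : Int) (r : Option Int) : Bool :=
  let s := PySem.List.slice sequence.toList (some l)
    (some (match r with | none => (sequence.toList.length : Int) | some v => v))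
  decide (PySem.Chars.lower s ≠ PySem.Chars.upper s)

-- ===== PRECONDITION & SPEC =====
def Spec_isaplha (sequence : String) (l : Int) (r : Option Int) (out : Bool) : Prop := out = isaplha_alt sequence l r
instance (sequence : String) (l : Int) (r : Option Int) (out : Bool) : Decidable (Spec_isaplha sequence l r out) := by unfold Spec_isaplha; infer_instance

-- ===== CLAIM (what is proved, stated in full; the proofs are below) =====
def Claim_equal_isaplha : Prop := ∀ (sequence : String) (l : Int) (r : Option Int), Dom_isaplha sequence l r → Spec_isaplha sequence l r (isaplha sequence l r)

-- ===== LEMMAS AND PROOFS =====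

-- a char changes under ASCII case mapping iff it is an ASCII letter
lemma lowerChar_ne_upperChar_iff (c : Char) :
    (PySem.Chars.lowerChar c ≠ PySem.Chars.upperChar c) ↔
      ((65 ≤ c.toNat ∧ c.toNat ≤ 90) ∨ (97 ≤ c.toNat ∧ c.toNat ≤ 122)) := by
  have hle : ∀ a b : Char, (a ≤ b) ↔ a.toNat ≤ b.toNat := fun a b => Iff.rfl
  simp only [PySem.Chars.lowerChar, PySem.Chars.upperChar, PySem.Chars.isupper, PySem.Chars.islower,
    Bool.and_eq_true, decide_eq_true_eq, hle]
  have hA : ('A' : Char).toNat = 65 := rfl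
  have hZ : ('Z' : Char).toNat = 90 := rfl
  have ha : ('a' : Char).toNat = 97 := rfl
  have hz : ('z' : Char).toNat = 122 := rfl
  rw [hA, hZ, ha, hz]
  split_ifs with h1 h2 h2
  · omega
  · have hv : (Char.ofNat (c.toNat + 32)).toNat = c.toNat + 32 := by
      rw [Char.toNat_ofNat, if_pos]; left; omega
    constructor
    · intro _; left; omega
    · intro _ he; have := congrArg Char.toNat he; rw [hv] at this; omega
  · have hv : (Char.ofNat (c.toNat - 32)).toNat = c.toNat - 32 := by
      rw [Char.toNat_ofNat, if_pos]; left; omega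
    constructor
    · intro _; right; omega
    · intro _ he; have := congrArg Char.toNat he; rw [hv] at this; omega
  · simp; omega

-- A's early-exit loop is List.any of the letter predicate
lemma isaplhaLoop_eq_any (xs : List Char) :
    isaplhaLoop xs = xs.any (fun i => (65 ≤ i.toNat && i.toNat ≤ 90) || (97 ≤ i.toNat && i.toNat ≤ 122)) := by
  induction xs with
  | nil => rfl
  | cons c rest ih => simp [isaplhaLoop, ih]

-- the case-mapped copies differ iff some char is a letter
lemma lower_ne_upper_iff (xs : List Char) :
    (PySem.Chars.lower xs ≠ PySem.Chars.upper xs) ↔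
      ∃ c ∈ xs, (65 ≤ c.toNat ∧ c.toNat ≤ 90) ∨ (97 ≤ c.toNat ∧ c.toNat ≤ 122) := by
  induction xs with
  | nil => simp [PySem.Chars.lower, PySem.Chars.upper]
  | cons c rest ih =>
      simp only [PySem.Chars.lower, PySem.Chars.upper, List.map_cons] at ih ⊢
      constructor
      · intro h
        by_cases hc : PySem.Chars.lowerChar c = PySem.Chars.upperChar c
        · have : PySem.Chars.lower rest ≠ PySem.Chars.upper rest := by
            intro he; exact h (by simp [PySem.Chars.lower, PySem.Chars.upper] at he ⊢; exact ⟨hc, he⟩)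
          obtain ⟨d, hd, hp⟩ := ih.mp this
          exact ⟨d, List.mem_cons_of_mem _ hd, hp⟩
        · exact ⟨c, List.mem_cons_self, (lowerChar_ne_upperChar_iff c).mp hc⟩
      · rintro ⟨d, hd, hp⟩
        rcases List.mem_cons.mp hd with rfl | hd'
        · intro he
          have := (List.cons.injEq _ _ _ _).mp he
          exact (lowerChar_ne_upperChar_iff d).mpr hp this.1
        · intro he
          have := (List.cons.injEq _ _ _ _).mp he
          exact (ih.mpr ⟨d, hd', hp⟩) (by simpa [PySem.Chars.lower, PySem.Chars.upper] using this.2)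

theorem isaplha_eq_alt (sequence : String) (l : Int) (r : Option Int) :
    isaplha sequence l r = isaplha_alt sequence l r := by
  unfold isaplha isaplha_alt
  set sl := PySem.List.slice sequence.toList (some l)
      (some (match r with | none => (sequence.toList.length : Int) | some v => v)) with hsl
  rw [isaplhaLoop_eq_any]
  by_cases h : ∃ c ∈ sl, (65 ≤ c.toNat ∧ c.toNat ≤ 90) ∨ (97 ≤ c.toNat ∧ c.toNat ≤ 122)
  · have h1 : sl.any (fun i => (65 ≤ i.toNat && i.toNat ≤ 90) || (97 ≤ i.toNat && i.toNat ≤ 122)) = true := by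
      rw [List.any_eq_true]
      obtain ⟨c, hc, hp⟩ := h
      refine ⟨c, hc, ?_⟩
      simp only [Bool.or_eq_true, Bool.and_eq_true, decide_eq_true_eq]
      omega
    rw [h1, eq_comm, decide_eq_true_iff]
    exact (lower_ne_upper_iff sl).mpr h
  · have h1 : sl.any (fun i => (65 ≤ i.toNat && i.toNat ≤ 90) || (97 ≤ i.toNat && i.toNat ≤ 122)) = false := by
      rw [List.any_eq_false]
      intro c hc
      simp only [Bool.or_eq_true, Bool.and_eq_true, decide_eq_true_eq]
      intro hp
      exact h ⟨c, hc, by omega⟩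
    rw [h1, eq_comm, decide_eq_false_iff_not]
    intro hne
    exact h ((lower_ne_upper_iff sl).mp hne)

-- ===== VERDICT (by name: the statement is the Claim_ definition above) =====
theorem isaplha_spec : Claim_equal_isaplha := by
  intro sequence l r _
  exact isaplha_eq_alt sequence l r
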